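-- pv_equiv track=rewrite | github.com/yamb0x/comfyui-cinema4d-bridge | src/core/app_ui_methods.py | _sort_nodes_by_workflow_order
-- ===== SOURCE A (Python) =====
-- def _sort_nodes_by_workflow_order(node_ids: list, workflow: dict) -> list:
--     """Sort nodes in ComfyUI workflow order: Checkpoint → LoRA → KSampler → Others"""
--     node_order = []
--
--     # Priority order for node types
--     priority_order = {
--         'CheckpointLoaderSimple': 1,
--         'CheckpointLoader': 1,
--         'UNETLoader': 1,  # Same priority as checkpoint loaders
--         'VAELoader': 1,
--         'QuadrupleCLIPLoader': 1,
--         'LoraLoader': 2,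
--         'ModelSamplingSD3': 3,
--         'KSampler': 4,
--         'FluxGuidance': 5,
--         'EmptySD3LatentImage': 6,
--         'CLIPTextEncode': 7,  # Will be handled separately
--     }
--
--     # Separate and sort nodes
--     categorized_nodes = {}
--     for node_id in node_ids:
--         # Extract numeric ID from node_id like "KSampler_10" -> "10"
--         numeric_id = node_id.split('_')[-1] if '_' in node_id else node_id
--         node = workflow.get(str(numeric_id))
--         if not node:
--             continue
--
--         node_type = node.get('type', '')
--         priority = priority_order.get(node_type, 99)
--
--         if priority not in categorized_nodes:
--             categorized_nodes[priority] = []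
--         categorized_nodes[priority].append(node_id)
--
--     # Build ordered list
--     for priority in sorted(categorized_nodes.keys()):
--         nodes_in_category = categorized_nodes[priority]
--
--         # For LoRA nodes, sort by node ID to maintain order
--         if priority == 2:  # LoraLoader
--             nodes_in_category.sort(key=int)
--
--         node_order.extend(nodes_in_category)
--
--     return node_order
-- ===== SOURCE B (Python) =====
-- def _sort_nodes_by_workflow_order(node_ids: list, workflow: dict) -> list:
--     """Single pass tagging each node id with its priority, then a fixed-table sweep
--     over the known priority levels instead of a bucket dict + sorted(keys)."""
--     priority_order = {
--         'CheckpointLoaderSimple': 1,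
--         'CheckpointLoader': 1,
--         'UNETLoader': 1,
--         'VAELoader': 1,
--         'QuadrupleCLIPLoader': 1,
--         'LoraLoader': 2,
--         'ModelSamplingSD3': 3,
--         'KSampler': 4,
--         'FluxGuidance': 5,
--         'EmptySD3LatentImage': 6,
--         'CLIPTextEncode': 7,
--     }
--     eligible = []
--     for node_id in node_ids:
--         numeric_id = node_id.split('_')[-1] if '_' in node_id else node_id
--         node = workflow.get(str(numeric_id))
--         if node:
--             eligible.append((node_id, priority_order.get(node.get('type', ''), 99)))
--     result = []
--     for p in (1, 2, 3, 4, 5, 6, 7, 99):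
--         bucket = [nid for nid, q in eligible if q == p]
--         if p == 2:
--             bucket.sort(key=int)
--         result.extend(bucket)
--     return result
-- ===== Notes on version B (the rewrite author's own statement) =====
-- stated objective: simpler
-- what changed: Replaces A's priority-keyed bucket dict plus sorted(keys) iteration with one pass that tags each kept node id with its priority followed by a sweep over the fixed table of priority levels (1..7, 99), sorting only the LoRA bucket numerically.
import Mathlib
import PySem

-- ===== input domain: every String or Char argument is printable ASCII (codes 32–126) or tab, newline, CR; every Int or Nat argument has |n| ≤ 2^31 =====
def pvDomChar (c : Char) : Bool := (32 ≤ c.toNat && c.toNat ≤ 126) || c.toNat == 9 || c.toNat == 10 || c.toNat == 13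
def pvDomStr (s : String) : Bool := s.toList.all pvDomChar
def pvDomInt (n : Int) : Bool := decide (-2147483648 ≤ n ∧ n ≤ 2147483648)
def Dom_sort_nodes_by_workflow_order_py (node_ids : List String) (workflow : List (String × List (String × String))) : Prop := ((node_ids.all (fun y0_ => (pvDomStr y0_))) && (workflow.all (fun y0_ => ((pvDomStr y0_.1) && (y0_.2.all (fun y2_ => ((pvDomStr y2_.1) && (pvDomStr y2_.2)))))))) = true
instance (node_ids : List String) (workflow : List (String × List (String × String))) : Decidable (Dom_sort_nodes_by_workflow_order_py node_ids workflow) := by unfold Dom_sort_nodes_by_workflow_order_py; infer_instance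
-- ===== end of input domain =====

-- B replaces A's priority-keyed bucket dict + sorted(keys) iteration by one tagging
-- pass plus a sweep over the fixed table of priority levels (objective: simpler).

-- shared module constant: the priority_order dict literal (same in Source A and Source B)
def pvPriorityOrder : PySem.Dict String Int := PySem.Dict.mk
  [("CheckpointLoaderSimple", 1), ("CheckpointLoader", 1), ("UNETLoader", 1),
   ("VAELoader", 1), ("QuadrupleCLIPLoader", 1), ("LoraLoader", 2),
   ("ModelSamplingSD3", 3), ("KSampler", 4), ("FluxGuidance", 5),
   ("EmptySD3LatentImage", 6), ("CLIPTextEncode", 7)]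

-- node_id.split('_')[-1] if '_' in node_id else node_id   (same line in Source A and Source B)
def pvNumericId (node_id : String) : String :=
  if PySem.Str.isIn "_" node_id then
    (PySem.List.pyGet? ((PySem.Str.split? node_id "_").getD []) (-1)).getD ""
  else node_id

-- key=int used on the LoraLoader bucket (total form; Pre_ excludes the ValueError inputs)
def pvIntKey (s : String) : Int := (PySem.Int.ofStr? s).getD 0

-- ===== PORT A =====
-- body of A's first loop: skip on missing / falsy node, else append into the bucket dict
def pvStepA (workflow : List (String × List (String × String)))
    (d : PySem.Dict Int (List String)) (node_id : String) : PySem.Dict Int (List String) :=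
  match (PySem.Dict.mk workflow).get? (pvNumericId node_id) with
  | none => d
  | some node =>
    if node.isEmpty then d
    else
      let node_type := (PySem.Dict.mk node).getD "type" ""
      let priority := pvPriorityOrder.getD node_type 99
      d.modify priority [] (· ++ [node_id])

def sort_nodes_by_workflow_order_py (node_ids : List String) (workflow : List (String × List (String × String))) : List String :=
  let categorized := node_ids.foldl (pvStepA workflow) PySem.Dict.empty
  (PySem.List.sorted categorized.keys (fun x => x) false).foldl
    (fun node_order priority =>
      let nodes_in_category := categorized.getD priority []
      let nodes_in_category :=
        if priority == 2 then PySem.List.sorted nodes_in_category pvIntKey false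
        else nodes_in_category
      node_order ++ nodes_in_category) []

-- ===== PORT B =====
-- body of B's tagging loop: append (node_id, priority) when the looked-up node is truthy
def pvTagB (workflow : List (String × List (String × String)))
    (acc : List (String × Int)) (node_id : String) : List (String × Int) :=
  match (PySem.Dict.mk workflow).get? (pvNumericId node_id) with
  | none => acc
  | some node =>
    if node.isEmpty then acc
    else acc ++ [(node_id, pvPriorityOrder.getD ((PySem.Dict.mk node).getD "type" "") 99)]

def sort_nodes_by_workflow_order_py_alt (node_ids : List String) (workflow : List (String × List (String × String))) : List String :=
  let eligible := node_ids.foldl (pvTagB workflow) []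
  ([1, 2, 3, 4, 5, 6, 7, 99] : List Int).foldl
    (fun result p =>
      let bucket := (eligible.filter (fun t => t.2 == p)).map (·.1)
      let bucket := if p == 2 then PySem.List.sorted bucket pvIntKey false else bucket
      result ++ bucket) []

-- ===== PRECONDITION & SPEC =====
-- Pre_-only helper: the priority A assigns to node_id, none when the node is skipped
def pvPrioOf (workflow : List (String × List (String × String))) (node_id : String) : Option Int :=
  match (PySem.Dict.mk workflow).get? (pvNumericId node_id) with
  | none => none
  | some node =>
    if node.isEmpty then none
    else some (pvPriorityOrder.getD ((PySem.Dict.mk node).getD "type" "") 99)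

-- Pre_ excludes exactly the inputs where A raises ValueError: a kept node id of
-- LoraLoader priority that int() cannot parse (sort key=int is applied to the whole id).
def Pre_sort_nodes_by_workflow_order_py (node_ids : List String) (workflow : List (String × List (String × String))) : Prop :=
  ∀ nid ∈ node_ids, pvPrioOf workflow nid = some 2 → (PySem.Int.ofStr? nid).isSome = true
instance (node_ids : List String) (workflow : List (String × List (String × String))) : Decidable (Pre_sort_nodes_by_workflow_order_py node_ids workflow) := by unfold Pre_sort_nodes_by_workflow_order_py; infer_instance

def pvWitness_sort_nodes_by_workflow_order_py : List String × (List (String × List (String × String))) :=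
  (["KSampler_1", "7", "3"],
   [("1", [("type", "KSampler")]), ("7", [("type", "LoraLoader")]), ("3", [("type", "CheckpointLoader")])])

def Spec_sort_nodes_by_workflow_order_py (node_ids : List String) (workflow : List (String × List (String × String))) (out : List String) : Prop := out = sort_nodes_by_workflow_order_py_alt node_ids workflow
instance (node_ids : List String) (workflow : List (String × List (String × String))) (out : List String) : Decidable (Spec_sort_nodes_by_workflow_order_py node_ids workflow out) := by unfold Spec_sort_nodes_by_workflow_order_py; infer_instance

-- ===== CLAIM (what is proved, stated in full; the proofs are below) =====
def Claim_equal_sort_nodes_by_workflow_order_py : Prop := ∀ (node_ids : List String) (workflow : List (String × List (String × String))), Dom_sort_nodes_by_workflow_order_py node_ids workflow → Pre_sort_nodes_by_workflow_order_py node_ids workflow → Spec_sort_nodes_by_workflow_order_py node_ids workflow (sort_nodes_by_workflow_order_py node_ids workflow)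

-- ===== LEMMAS AND PROOFS =====

-- every priority the table can yield
def pvUniverse : List Int := [1, 2, 3, 4, 5, 6, 7, 99]

theorem pvPrio_mem_universe (t : String) : pvPriorityOrder.getD t 99 ∈ pvUniverse := by
  rw [PySem.Dict.getD_eq_get?_getD]
  cases h : pvPriorityOrder.get? t with
  | none => simp [pvUniverse]
  | some v =>
    have h2 := PySem.Dict.mem_items_of_get?_eq_some _ h
    simp [pvPriorityOrder, Prod.ext_iff] at h2
    simp only [pvUniverse, Option.getD_some, List.mem_cons, List.not_mem_nil, or_false]
    rcases h2 with ⟨-, rfl⟩ | ⟨-, rfl⟩ | ⟨-, rfl⟩ | ⟨-, rfl⟩ | ⟨-, rfl⟩ | ⟨-, rfl⟩ | ⟨-, rfl⟩ | ⟨-, rfl⟩ | ⟨-, rfl⟩ | ⟨-, rfl⟩ | ⟨-, rfl⟩ <;> simp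

-- B's tagging fold, with a generalized accumulator
theorem pvTagB_eq (workflow : List (String × List (String × String))) (ns : List String)
    (acc : List (String × Int)) :
    ns.foldl (pvTagB workflow) acc = acc ++ ns.foldl (pvTagB workflow) [] := by
  induction ns generalizing acc with
  | nil => simp
  | cons n t ih =>
    simp only [List.foldl_cons]
    rw [ih, ih (pvTagB workflow [] n)]
    unfold pvTagB
    cases (PySem.Dict.mk workflow).get? (pvNumericId n) with
    | none => simp
    | some node => by_cases h : node.isEmpty <;> simp [h]

-- A's dict fold is the group-by fold over B's tagged list
theorem pvStepA_eq_tag (workflow : List (String × List (String × String))) (ns : List String)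
    (d : PySem.Dict Int (List String)) :
    ns.foldl (pvStepA workflow) d
      = (ns.foldl (pvTagB workflow) []).foldl
          (fun d t => d.modify t.2 [] (· ++ [t.1])) d := by
  induction ns generalizing d with
  | nil => simp
  | cons n t ih =>
    simp only [List.foldl_cons]
    rw [pvTagB_eq workflow t (pvTagB workflow [] n), ih]
    unfold pvStepA pvTagB
    cases (PySem.Dict.mk workflow).get? (pvNumericId n) with
    | none => simp
    | some node =>
      by_cases h : node.isEmpty <;> simp [h, List.foldl_cons]

-- the group-by fold read back at one key
theorem pvGroup_getD (l : List (String × Int)) (d : PySem.Dict Int (List String)) (p : Int) :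
    (l.foldl (fun d t => d.modify t.2 [] (· ++ [t.1])) d).getD p []
      = d.getD p [] ++ (l.filter (fun t => t.2 == p)).map (·.1) := by
  induction l generalizing d with
  | nil => simp
  | cons a t ih =>
    simp only [List.foldl_cons, List.filter_cons]
    rw [ih]
    by_cases h : a.2 = p
    · simp [h]
    · have hb : (a.2 == p) = false := by simp [h]
      rw [PySem.Dict.getD_modify, if_neg (fun hh => h hh.symm)]
      simp [hb]

-- the group-by fold's key list
theorem pvGroup_keys (l : List (String × Int)) :
    (l.foldl (fun d t => d.modify t.2 [] (· ++ [t.1])) PySem.Dict.empty).keys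
      = PySem.Set.ofList (l.map (·.2)) := by
  have h := PySem.Dict.keys_foldl_modify_key (l := l) (key := fun t : String × Int => t.2)
    (d0 := ([] : List String)) (f := fun (_ : PySem.Dict Int (List String)) (t : String × Int) => (· ++ [t.1]))
    (d := PySem.Dict.empty)
  simpa [PySem.Set.ofList] using h

-- every priority tagged by B's loop lies in the fixed universe
theorem pvTag_snd_mem (workflow : List (String × List (String × String))) (ns : List String)
    (acc : List (String × Int)) (hacc : ∀ t ∈ acc, t.2 ∈ pvUniverse) :
    ∀ t ∈ ns.foldl (pvTagB workflow) acc, t.2 ∈ pvUniverse := by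
  induction ns generalizing acc with
  | nil => simpa using hacc
  | cons n tl ih =>
    simp only [List.foldl_cons]
    apply ih
    unfold pvTagB
    cases (PySem.Dict.mk workflow).get? (pvNumericId n) with
    | none => exact hacc
    | some node =>
      by_cases h : node.isEmpty <;> simp only [h, if_true, Bool.false_eq_true, if_false]
      · exact hacc
      · intro t ht
        rcases List.mem_append.mp ht with h1 | h2
        · exact hacc t h1
        · simp only [List.mem_singleton] at h2
          subst h2
          exact pvPrio_mem_universe _

-- sorted(keys) of a nodup key list drawn from the fixed universe is the universe filtered
theorem pvSortedKeys (ks : List Int) (hnd : ks.Nodup) (hsub : ∀ k ∈ ks, k ∈ pvUniverse) :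
    PySem.List.sorted ks (fun x => x) false = pvUniverse.filter (fun u => decide (u ∈ ks)) := by
  apply PySem.List.sorted_eq_of_perm_of_pairwise_lt
  · apply (List.perm_ext_iff_of_nodup (List.Nodup.filter _ (by decide)) hnd).mpr
    intro a
    simp only [List.mem_filter, decide_eq_true_eq]
    exact ⟨fun h => h.2, fun h => ⟨hsub a h, h⟩⟩
  · have : pvUniverse.Pairwise (fun a b : Int => a < b) := by decide
    exact List.Pairwise.filter _ this

-- a bucket sweep over a sublist of the universe equals the sweep over the whole
-- universe when the missing levels have empty buckets
theorem pvSweep (g : Int → List String) (U : List Int) (q : Int → Bool)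
    (h : ∀ p ∈ U, q p = false → g p = []) (acc : List String) :
    (U.filter q).foldl (fun a p => a ++ g p) acc = U.foldl (fun a p => a ++ g p) acc := by
  induction U generalizing acc with
  | nil => simp
  | cons u t ih =>
    simp only [List.filter_cons]
    by_cases hq : q u = true
    · simp only [hq, if_true, List.foldl_cons]
      exact ih (fun p hp hqp => h p (List.mem_cons_of_mem _ hp) hqp) _
    · have hf : q u = false := by simpa using hq
      simp only [hf, Bool.false_eq_true, if_false, List.foldl_cons, h u (List.mem_cons_self) hf,
        List.append_nil]
      exact ih (fun p hp hqp => h p (List.mem_cons_of_mem _ hp) hqp) _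

-- ===== VERDICT (by name: the statement is the Claim_ definition above) =====
theorem sort_nodes_by_workflow_order_py_spec : Claim_equal_sort_nodes_by_workflow_order_py := by
  intro node_ids workflow _ _
  unfold Spec_sort_nodes_by_workflow_order_py
  unfold sort_nodes_by_workflow_order_py sort_nodes_by_workflow_order_py_alt
  simp only []
  set E := node_ids.foldl (pvTagB workflow) [] with hE
  have hdict := pvStepA_eq_tag workflow node_ids PySem.Dict.empty
  rw [hdict]
  set D := E.foldl (fun d t => d.modify t.2 [] (· ++ [t.1])) PySem.Dict.empty with hD
  have hkeys : D.keys = PySem.Set.ofList (E.map (·.2)) := pvGroup_keys E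
  have hnd : D.keys.Nodup := by rw [hkeys]; exact PySem.Set.nodup_ofList _
  have hsub : ∀ k ∈ D.keys, k ∈ pvUniverse := by
    intro k hk
    rw [hkeys] at hk
    have : k ∈ E.map (·.2) := (PySem.Set.mem_ofList _ _).mp hk
    obtain ⟨t, ht, rfl⟩ := List.mem_map.mp this
    exact pvTag_snd_mem workflow node_ids [] (by simp) t ht
  rw [pvSortedKeys D.keys hnd hsub]
  have hbucket : ∀ p : Int, D.getD p [] = (E.filter (fun t => t.2 == p)).map (·.1) := by
    intro p; rw [hD, pvGroup_getD]; simp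
  have hempty : ∀ p ∈ pvUniverse, decide (p ∈ D.keys) = false →
      (if p == 2 then PySem.List.sorted (D.getD p []) pvIntKey false else D.getD p []) = [] := by
    intro p _ hnp
    have : D.getD p [] = [] := by
      rw [hbucket]
      have : ∀ t ∈ E, (t.2 == p) = false := by
        intro t ht
        by_contra hc
        have h2 : t.2 = p := by simpa using hc
        apply absurd hnp
        simp only [hkeys, decide_eq_false_iff_not, not_not]
        exact (PySem.Set.mem_ofList _ _).mpr (List.mem_map.mpr ⟨t, ht, h2⟩)
      rw [List.filter_eq_nil_iff.mpr (by intro t ht; simp [this t ht])]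
      simp
    rw [this]
    split <;> rfl
  rw [pvSweep _ pvUniverse _ hempty]
  apply PySem.List.foldl_congr_mem
  intro acc p _
  rw [hbucket p]
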